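-- pv_equiv track=rewrite | github.com/LIV4D/AnnotationPlatform | cli/src/liv4dcli/utils.py | calculate_column_lengths
-- ===== SOURCE A (Python) =====
-- def calculate_column_lengths(table, headers=None):
--     if headers is None:
--         headers = table[0].keys()
--     data_dict = { k: [] for k in headers }
--     for obj in table:
--         for key in headers:
--             data_dict[key].append(obj[key])
--     for key in headers:
--         data_dict[key].append(key)
--     return [max([len(str(value)) for value in column]) for column in data_dict.values()]
-- ===== SOURCE B (Python) =====
-- def calculate_column_lengths(table, headers=None):
--     if headers is None:
--         headers = table[0].keys()
--     keys = list(dict.fromkeys(headers))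
--     maxes = [len(str(k)) for k in keys]
--     for obj in table:
--         maxes = [max(m, len(str(obj[k]))) for m, k in zip(maxes, keys)]
--     return maxes
-- ===== Notes on version B (the rewrite author's own statement) =====
-- stated objective: simpler
-- what changed: Replaces A's build-every-column-as-a-list-then-max structure (dict of value lists populated by two loops, then a max comprehension per column) with a single running-max pass that keeps one integer per deduplicated header, seeded with the header lengths; no per-column value lists are ever built.
import Mathlib
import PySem

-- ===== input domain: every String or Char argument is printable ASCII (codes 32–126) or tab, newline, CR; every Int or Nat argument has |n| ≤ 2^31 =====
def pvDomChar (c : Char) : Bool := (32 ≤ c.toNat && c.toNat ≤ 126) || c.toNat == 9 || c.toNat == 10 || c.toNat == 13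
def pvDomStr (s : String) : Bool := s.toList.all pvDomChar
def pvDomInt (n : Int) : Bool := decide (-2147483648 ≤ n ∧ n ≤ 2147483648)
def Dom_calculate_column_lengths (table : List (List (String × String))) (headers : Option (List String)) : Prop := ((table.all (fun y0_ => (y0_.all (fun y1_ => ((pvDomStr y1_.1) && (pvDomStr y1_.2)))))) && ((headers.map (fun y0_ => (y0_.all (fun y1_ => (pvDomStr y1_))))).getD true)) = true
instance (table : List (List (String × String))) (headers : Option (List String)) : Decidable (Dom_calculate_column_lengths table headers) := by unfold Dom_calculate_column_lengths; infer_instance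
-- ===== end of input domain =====

-- B replaces A's build-column-lists-then-max structure by a single running-max pass
-- keeping one integer per deduplicated header (objective: simpler, same asymptotic cost).

-- ===== PORT A =====
-- obj[key] (Python dict lookup; a row is modelled as dict(assoc list), duplicate keys overwrite).
-- Python raises KeyError where the key is absent; such inputs are excluded by Pre_, the port
-- returns the default "" there.
def pvVal (obj : List (String × String)) (key : String) : String :=
  PySem.Dict.getD (PySem.Dict.ofList obj) key ""

def calculate_column_lengths (table : List (List (String × String))) (headers : Option (List String)) : List Int :=
  -- if headers is None: headers = table[0].keys()   (table[0] raises IndexError on []; excluded by Pre_)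
  let hs : List String := match headers with
    | some hs => hs
    | none => (PySem.Dict.ofList (table.headD [])).keys
  -- data_dict = { k: [] for k in headers }
  let d0 : PySem.Dict String (List String) :=
    hs.foldl (fun d k => d.insert k ([] : List String)) PySem.Dict.empty
  -- for obj in table: for key in headers: data_dict[key].append(obj[key])
  let d1 := table.foldl (fun d obj =>
    hs.foldl (fun d key => d.modify key [] (fun col => col ++ [pvVal obj key])) d) d0
  -- for key in headers: data_dict[key].append(key)
  let d2 := hs.foldl (fun d key => d.modify key [] (fun col => col ++ [key])) d1
  -- [max([len(str(value)) for value in column]) for column in data_dict.values()]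
  -- (columns are never empty — each holds its header — so the .getD 0 default of max? is unreachable)
  d2.values.map (fun column =>
    (PySem.List.max? (column.map (fun value => PySem.Str.len value)) (fun x => x)).getD 0)

-- ===== PORT B =====
def calculate_column_lengths_alt (table : List (List (String × String))) (headers : Option (List String)) : List Int :=
  let hs : List String := match headers with
    | some hs => hs
    | none => (PySem.Dict.ofList (table.headD [])).keys
  -- keys = list(dict.fromkeys(headers))
  let keys := PySem.List.dedup hs
  -- maxes = [len(str(k)) for k in keys]
  let maxes := keys.map (fun k => PySem.Str.len k)
  -- for obj in table: maxes = [max(m, len(str(obj[k]))) for m, k in zip(maxes, keys)]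
  table.foldl (fun maxes obj =>
    (maxes.zip keys).map (fun p => max p.1 (PySem.Str.len (pvVal obj p.2)))) maxes

-- ===== PRECONDITION & SPEC =====
-- Pre_ excludes exactly where Python A raises: table[0] on an empty table with headers=None
-- (IndexError), and a row missing one of the headers (KeyError).
def Pre_calculate_column_lengths (table : List (List (String × String))) (headers : Option (List String)) : Prop :=
  (headers = none → table ≠ []) ∧
  ∀ obj ∈ table, ∀ k ∈ (match headers with
      | some hs => hs
      | none => (PySem.Dict.ofList (table.headD [])).keys),
    (PySem.Dict.ofList obj).contains k = true

instance (table : List (List (String × String))) (headers : Option (List String)) : Decidable (Pre_calculate_column_lengths table headers) := by unfold Pre_calculate_column_lengths; infer_instance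

def pvWitness_calculate_column_lengths : (List (List (String × String))) × Option (List String) :=
  ([[("a", "xy"), ("b", "q")], [("a", "1"), ("b", "hello")]], none)

def Spec_calculate_column_lengths (table : List (List (String × String))) (headers : Option (List String)) (out : List Int) : Prop := out = calculate_column_lengths_alt table headers
instance (table : List (List (String × String))) (headers : Option (List String)) (out : List Int) : Decidable (Spec_calculate_column_lengths table headers out) := by unfold Spec_calculate_column_lengths; infer_instance

-- ===== CLAIM (what is proved, stated in full; the proofs are below) =====
def Claim_equal_calculate_column_lengths : Prop := ∀ (table : List (List (String × String))) (headers : Option (List String)), Dom_calculate_column_lengths table headers → Pre_calculate_column_lengths table headers → Spec_calculate_column_lengths table headers (calculate_column_lengths table headers)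

-- ===== LEMMAS AND PROOFS =====

-- running max over a replicate block
lemma foldl_max_replicate (m : Nat) (a x : Int) :
    (List.replicate m x).foldl max a = if m = 0 then a else max a x := by
  induction m generalizing a with
  | zero => simp
  | succ n ih =>
    simp only [List.replicate_succ, List.foldl_cons, ih]
    rcases Nat.eq_zero_or_pos n with h | h
    · simp [h]
    · simp [Nat.pos_iff_ne_zero.mp h]

-- pull a component of the seed out of a running max
lemma foldl_max_extract (vs : List Int) : ∀ a b : Int,
    vs.foldl max (max a b) = max (vs.foldl max a) b := by
  induction vs with
  | nil => intro a b; rfl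
  | cons w t ih =>
    intro a b
    simp only [List.foldl_cons]
    rw [show max (max a b) w = max (max a w) b by
      rw [max_assoc, max_comm b w, ← max_assoc], ih]

-- a running max ignores replication of its inputs
lemma foldl_max_flatrep (c : Nat) (hc : c ≠ 0) (vs : List Int) : ∀ a : Int,
    (vs.flatMap (fun v => List.replicate c v)).foldl max a = vs.foldl max a := by
  induction vs with
  | nil => intro a; rfl
  | cons v t ih =>
    intro a
    simp only [List.flatMap_cons, List.foldl_append, foldl_max_replicate, hc, if_false,
      List.foldl_cons, ih]

-- max over one of A's columns (c copies of each value, then c copies of the header)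
-- equals B's running max seeded with the header length
lemma colmax (vs : List Int) (n : Int) (c : Nat) (hc : c ≠ 0) :
    (PySem.List.max?
        ((vs.flatMap (fun v => List.replicate c v)) ++ List.replicate c n) (fun x => x)).getD 0
      = vs.foldl max n := by
  cases vs with
  | nil =>
    cases c with
    | zero => exact absurd rfl hc
    | succ m =>
      simp only [List.flatMap_nil, List.nil_append, List.replicate_succ,
        PySem.List.max?_id_cons, Option.getD_some, List.foldl_nil, foldl_max_replicate]
      split <;> simp
  | cons v t =>
    cases c with
    | zero => exact absurd rfl hc
    | succ m =>
      have hL : (((v :: t).flatMap (fun x => List.replicate (m + 1) x))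
            ++ List.replicate (m + 1) n)
          = v :: ((List.replicate m v ++ t.flatMap (fun x => List.replicate (m + 1) x))
            ++ List.replicate (m + 1) n) := by
        simp [List.replicate_succ, List.append_assoc]
      rw [hL, PySem.List.max?_id_cons, Option.getD_some, List.foldl_append,
        List.foldl_append, foldl_max_replicate, if_neg (Nat.succ_ne_zero m),
        foldl_max_replicate]
      have hv : (if m = 0 then v else max v v) = v := by split <;> simp
      rw [hv, foldl_max_flatrep (m + 1) (Nat.succ_ne_zero m), List.foldl_cons,
        max_comm n v, foldl_max_extract]

-- a modify-append loop over the header list appends (count) copies to column k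
lemma modifyLoopChar (g : String → String) (k : String) (hs : List String)
    (d : PySem.Dict String (List String)) :
    (hs.foldl (fun d key => d.modify key [] (fun col => col ++ [g key])) d).getD k []
      = d.getD k [] ++ List.replicate (hs.count k) (g k) := by
  have h : hs.foldl (fun d key => d.modify key [] (fun col => col ++ [g key])) d
      = (hs.map (fun key => (key, g key))).foldl
          (fun d p => d.modify p.1 [] (fun col => col ++ [p.2])) d := by
    rw [List.foldl_map]
  rw [h, PySem.Dict.getD_foldl_modify_append]
  congr 1
  rw [List.filter_map, List.map_map]
  have hf : (hs.filter ((fun p => p.1 == k) ∘ fun key => (key, g key))) = hs.filter (· == k) :=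
    rfl
  rw [hf, List.filter_beq]
  simp

-- the whole populate loop over the table
lemma outerChar (hs : List String) (k : String) : ∀ (table : List (List (String × String)))
    (d : PySem.Dict String (List String)),
    (table.foldl (fun d obj =>
        hs.foldl (fun d key => d.modify key [] (fun col => col ++ [pvVal obj key])) d) d).getD k []
      = d.getD k [] ++ table.flatMap (fun obj => List.replicate (hs.count k) (pvVal obj k)) := by
  intro table
  induction table with
  | nil => intro d; simp
  | cons obj t ih =>
    intro d
    simp only [List.foldl_cons, ih, modifyLoopChar, List.flatMap_cons, List.append_assoc]

-- the initialisation loop leaves every column empty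
lemma initChar (k : String) : ∀ (hs : List String) (d : PySem.Dict String (List String)),
    d.getD k [] = [] →
    (hs.foldl (fun d k' => d.insert k' ([] : List String)) d).getD k [] = [] := by
  intro hs
  induction hs with
  | nil => intro d h; exact h
  | cons x t ih =>
    intro d h
    simp only [List.foldl_cons]
    exact ih _ (by rw [PySem.Dict.getD_insert]; split <;> simp [h])

-- Set.update by elements already present is the identity
lemma updSelf (hs : List String) (s : List String) (h : ∀ x ∈ hs, x ∈ s) :
    PySem.Set.update s hs = s := by
  rw [PySem.Set.update_eq_append_filter]
  have : (PySem.Set.ofList hs).filter (fun y => !(PySem.Set.contains s y)) = [] := by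
    rw [List.filter_eq_nil_iff]
    intro y hy
    have hys : y ∈ s := h y ((PySem.Set.mem_ofList _ _).mp hy)
    simpa using hys
  rw [this, List.append_nil]

-- keys of the fully built dict = dedup of the headers
lemma keysChar (hs : List String) (table : List (List (String × String))) :
    (hs.foldl (fun d key => d.modify key [] (fun col => col ++ [key]))
      (table.foldl (fun d obj =>
          hs.foldl (fun d key => d.modify key [] (fun col => col ++ [pvVal obj key])) d)
        (hs.foldl (fun d k => d.insert k ([] : List String)) PySem.Dict.empty))).keys
      = PySem.Set.ofList hs := by
  have hupd : ∀ s : List String, s = PySem.Set.ofList hs → PySem.Set.update s hs = s := by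
    intro s hsEq
    exact updSelf hs s (fun x hx => hsEq ▸ (PySem.Set.mem_ofList _ _).mpr hx)
  have h0 : (hs.foldl (fun d k => d.insert k ([] : List String)) PySem.Dict.empty).keys
      = PySem.Set.ofList hs := by
    rw [PySem.Dict.keys_foldl_insert]
    simp [PySem.Set.update_nil_left]
  have h1 : ∀ (t : List (List (String × String))) (d : PySem.Dict String (List String)),
      d.keys = PySem.Set.ofList hs →
      (t.foldl (fun d obj =>
          hs.foldl (fun d key => d.modify key [] (fun col => col ++ [pvVal obj key])) d) d).keys
        = PySem.Set.ofList hs := by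
    intro t
    induction t with
    | nil => intro d h; exact h
    | cons obj tt ih =>
      intro d h
      simp only [List.foldl_cons]
      refine ih _ ?_
      rw [PySem.Dict.keys_foldl_modify, h, hupd _ rfl]
  rw [PySem.Dict.keys_foldl_modify, h1 table _ h0, hupd _ rfl]

-- zipping a mapped list with itself pairs each element with its image
lemma zipMapSelf (g : String → Int) : ∀ ks : List String,
    (ks.map g).zip ks = ks.map (fun k => (g k, k)) := by
  intro ks
  induction ks with
  | nil => rfl
  | cons a t ih => simp [ih]

-- B's loop, characterised per key
lemma altChar (ks : List String) : ∀ (table : List (List (String × String)))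
    (g : String → Int),
    table.foldl (fun maxes obj =>
        (maxes.zip ks).map (fun p => max p.1 (PySem.Str.len (pvVal obj p.2)))) (ks.map g)
      = ks.map (fun k => table.foldl (fun a obj => max a (PySem.Str.len (pvVal obj k))) (g k)) := by
  intro table
  induction table with
  | nil => intro g; simp
  | cons obj t ih =>
    intro g
    simp only [List.foldl_cons]
    have hz : ((ks.map g).zip ks).map (fun p => max p.1 (PySem.Str.len (pvVal obj p.2)))
        = ks.map (fun k => max (g k) (PySem.Str.len (pvVal obj k))) := by
      rw [zipMapSelf g ks, List.map_map]
      rfl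
    rw [hz, ih (fun k => max (g k) (PySem.Str.len (pvVal obj k)))]

-- the two ports agree for ANY effective header list
lemma main_eq (hs : List String) (table : List (List (String × String))) :
    ((hs.foldl (fun d key => d.modify key [] (fun col => col ++ [key]))
        (table.foldl (fun d obj =>
            hs.foldl (fun d key => d.modify key [] (fun col => col ++ [pvVal obj key])) d)
          (hs.foldl (fun d k => d.insert k ([] : List String)) PySem.Dict.empty))).values.map
      (fun column =>
        (PySem.List.max? (column.map (fun value => PySem.Str.len value)) (fun x => x)).getD 0))
    = table.foldl (fun maxes obj =>
        ((maxes.zip (PySem.List.dedup hs)).map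
          (fun p => max p.1 (PySem.Str.len (pvVal obj p.2)))))
        ((PySem.List.dedup hs).map (fun k => PySem.Str.len k)) := by
  have hdedup : PySem.List.dedup hs = PySem.Set.ofList hs := PySem.List.dedup_eq_ofList hs
  rw [hdedup, altChar]
  set d2 := hs.foldl (fun d key => d.modify key [] (fun col => col ++ [key]))
      (table.foldl (fun d obj =>
          hs.foldl (fun d key => d.modify key [] (fun col => col ++ [pvVal obj key])) d)
        (hs.foldl (fun d k => d.insert k ([] : List String)) PySem.Dict.empty)) with hd2
  have hkeys : d2.keys = PySem.Set.ofList hs := keysChar hs table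
  have hnodup : d2.keys.Nodup := hkeys ▸ PySem.Set.nodup_ofList hs
  rw [PySem.Dict.values_eq_map_keys d2 hnodup [], hkeys, List.map_map]
  refine List.map_congr_left ?_
  intro k hk
  have hmem : k ∈ hs := (PySem.Set.mem_ofList _ _).mp hk
  have hc : hs.count k ≠ 0 := Nat.pos_iff_ne_zero.mp (List.count_pos_iff.mpr hmem)
  have hcol : d2.getD k [] =
      table.flatMap (fun obj => List.replicate (hs.count k) (pvVal obj k))
        ++ List.replicate (hs.count k) k := by
    rw [hd2, modifyLoopChar, outerChar,
      initChar k hs PySem.Dict.empty (by simp [PySem.Dict.getD_empty]), List.nil_append]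
  simp only [Function.comp_apply, hcol, List.map_append, List.map_replicate]
  have hflat : (table.flatMap (fun obj => List.replicate (hs.count k) (pvVal obj k))).map
      (fun value => PySem.Str.len value)
      = (table.map (fun obj => PySem.Str.len (pvVal obj k))).flatMap
          (fun v => List.replicate (hs.count k) v) := by
    rw [List.flatMap_map]
    simp [List.map_flatMap, List.map_replicate]
  rw [hflat, colmax _ _ _ hc, List.foldl_map]

-- ===== VERDICT (by name: the statement is the Claim_ definition above) =====
theorem calculate_column_lengths_spec : Claim_equal_calculate_column_lengths := by
  intro table headers _ _
  unfold Spec_calculate_column_lengths calculate_column_lengths calculate_column_lengths_alt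
  cases headers <;> exact main_eq _ table
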